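-- pv_equiv track=rewrite | github.com/ExpHP/rsp2 | scripts/unfold_lib/coalesce.py | get_splits
-- ===== SOURCE A (Python) =====
-- def get_splits(data, threshold):
--     """ Compute split indices for the ``coalesce`` function from a 1D array of
--     sorted data.
--
--     The output is a set of indices that partitions the data into segments
--     such that each segment contains at least one value, and contains a range of
--     values no wider than the threshold. (beyond these properties, the precise
--     selection of groupings is left unspecified). The first element is always 0,
--     and the last element is always the length of the data.
--     """
--     yield 0
--     data = iter(data)
--     start_value = next(data)
--
--     index = 0  # correct end value in case the loop runs 0 iterations
--     for index, x in enumerate(data, start=1):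
--         if start_value + threshold < x:
--             yield index
--             start_value = x
--     yield index + 1 # length of data
-- ===== SOURCE B (Python) =====
-- def _seg_end(data, target, lo, hi):
--     # first index j in [lo, hi) with data[j] > target (binary search; data sorted)
--     while lo < hi:
--         mid = (lo + hi) // 2
--         if data[mid] <= target:
--             lo = mid + 1
--         else:
--             hi = mid
--     return lo
--
-- def get_splits(data, threshold):
--     data = list(data)
--     n = len(data)
--     yield 0
--     i = 0
--     while i < n:
--         j = _seg_end(data, data[i] + threshold, i + 1, n)
--         if j >= n:
--             break
--         yield j
--         i = j
--     yield n
-- ===== Notes on version B (the rewrite author's own statement) =====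
-- stated objective: faster
-- what changed: Replaces the element-by-element linear scan with a binary search (hand-written bisect_right) that jumps directly to each segment's end, doing one O(log n) search per emitted split.
-- outside the precondition, e.g. on get_splits([0, 3, 1, 3], 1): A returns [0, 1, 4], B returns [0, 3, 4]
import Mathlib
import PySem

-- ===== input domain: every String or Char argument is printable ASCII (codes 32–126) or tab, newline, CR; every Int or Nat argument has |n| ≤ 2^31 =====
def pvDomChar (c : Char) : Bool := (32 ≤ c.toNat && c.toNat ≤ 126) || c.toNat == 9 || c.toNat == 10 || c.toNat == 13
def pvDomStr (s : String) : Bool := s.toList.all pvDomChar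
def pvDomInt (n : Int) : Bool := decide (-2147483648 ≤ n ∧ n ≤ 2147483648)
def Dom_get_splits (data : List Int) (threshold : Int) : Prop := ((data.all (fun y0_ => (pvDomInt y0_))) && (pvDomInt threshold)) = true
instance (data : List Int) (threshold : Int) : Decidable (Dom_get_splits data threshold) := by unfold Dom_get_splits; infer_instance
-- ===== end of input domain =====

-- B replaces A's element-by-element scan with a hand-written bisect_right binary search that jumps to each segment's end.


-- ===== PORT A =====
-- A is a generator; its port returns the list of yielded values. On empty data A raises
-- (RuntimeError from next() on an exhausted iterator); that input is outside Pre_ below,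
-- and the port returns the values yielded before the raise there.
def get_splits (data : List Int) (threshold : Int) : List Int :=
  match data with
  | [] => [0]
  | d0 :: rest =>
    -- state: (yielded values so far, start_value, index)
    let st := rest.foldl
      (fun (st : List Int × Int × Nat) x =>
        let acc := st.1
        let start_value := st.2.1
        let index := st.2.2 + 1
        if start_value + threshold < x then (acc ++ [(index : Int)], x, index)
        else (acc, start_value, index))
      ([0], d0, 0)
    st.1 ++ [((st.2.2 : Int) + 1)]

-- ===== PORT B =====
-- _seg_end: the hand-written bisect_right while-loop, ported as structural recursion on a
-- fuel that equals the gap hi - lo (each iteration shrinks the gap by at least one, so the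
-- fuel is exactly enough; it is only a totality guard, not part of the algorithm).
-- data[mid] is always in range (lo ≤ mid < hi ≤ data.length), so getD is exact; mid uses
-- Nat division, which agrees with Python's // on the nonnegative indices involved.
def segEndGo (data : List Int) (target : Int) : Nat → Nat → Nat → Nat
  | 0, lo, _ => lo
  | fuel + 1, lo, hi =>
    if lo < hi then
      let mid := (lo + hi) / 2
      if data.getD mid 0 ≤ target then segEndGo data target fuel (mid + 1) hi
      else segEndGo data target fuel lo mid
    else lo

def segEnd (data : List Int) (target : Int) (lo hi : Nat) : Nat :=
  segEndGo data target (hi - lo) lo hi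

-- the while-loop of B, ported as structural recursion on a fuel bounding n - i
-- (each iteration moves i to j ≥ i + 1, so n steps always suffice).
def altLoop (data : List Int) (threshold : Int) (n : Nat) : Nat → Nat → List Int
  | 0, _ => [(n : Int)]
  | fuel + 1, i =>
    if i < n then
      let j := segEnd data (data.getD i 0 + threshold) (i + 1) n
      if n ≤ j then [(n : Int)]
      else (j : Int) :: altLoop data threshold n fuel j
    else [(n : Int)]

def get_splits_alt (data : List Int) (threshold : Int) : List Int :=
  (0 : Int) :: altLoop data threshold data.length data.length 0

-- ===== PRECONDITION & SPEC =====
-- Pre_ excludes empty data, on which A raises RuntimeError, and unsorted data — which the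
-- docstring rules out ("a 1D array of sorted data") and on which A's scan result is an
-- implementation artefact a binary search should not reproduce — except the trivially
-- one-segment case (every value ≤ data[0] + threshold), where both return [0, length].
def Pre_get_splits (data : List Int) (threshold : Int) : Prop :=
  data ≠ [] ∧ (data.Pairwise (· ≤ ·) ∨ ∀ x ∈ data, x ≤ data.getD 0 0 + threshold)
instance (data : List Int) (threshold : Int) : Decidable (Pre_get_splits data threshold) := by
  unfold Pre_get_splits; infer_instance

def pvWitness_get_splits : List Int × Int := ([1, 2, 5, 6, 9], 2)

def Spec_get_splits (data : List Int) (threshold : Int) (out : List Int) : Prop := out = get_splits_alt data threshold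
instance (data : List Int) (threshold : Int) (out : List Int) : Decidable (Spec_get_splits data threshold out) := by unfold Spec_get_splits; infer_instance

-- ===== CLAIM (what is proved, stated in full; the proofs are below) =====
def Claim_equal_get_splits : Prop := ∀ (data : List Int) (threshold : Int), Dom_get_splits data threshold → Pre_get_splits data threshold → Spec_get_splits data threshold (get_splits data threshold)

-- ===== LEMMAS AND PROOFS =====

-- reference linear scan over the remaining elements l, with i the data-index of l's head
def scanL (l : List Int) (threshold start : Int) (i : Nat) : List Int :=
  match l with
  | [] => [(i : Int)]
  | x :: xs =>
    if start + threshold < x then (i : Int) :: scanL xs threshold x (i + 1)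
    else scanL xs threshold start (i + 1)

theorem fold_eq_scanL (threshold : Int) (l : List Int) :
    ∀ (acc : List Int) (start : Int) (idx : Nat),
    (let st := l.foldl
      (fun (st : List Int × Int × Nat) x =>
        let acc := st.1
        let start_value := st.2.1
        let index := st.2.2 + 1
        if start_value + threshold < x then (acc ++ [(index : Int)], x, index)
        else (acc, start_value, index))
      (acc, start, idx)
     st.1 ++ [((st.2.2 : Int) + 1)]) = acc ++ scanL l threshold start (idx + 1) := by
  induction l with
  | nil => intro acc start idx; simp [scanL]
  | cons x xs ih =>
    intro acc start idx
    simp only [List.foldl_cons, scanL]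
    by_cases hc : start + threshold < x
    · simp only [if_pos hc]
      rw [ih]
      simp [List.append_assoc]
    · simp only [if_neg hc]
      rw [ih]

theorem segEndGo_ge (data : List Int) (target : Int) :
    ∀ (fuel lo hi : Nat), lo ≤ segEndGo data target fuel lo hi := by
  intro fuel
  induction fuel with
  | zero => intro lo hi; exact le_refl lo
  | succ fuel ih =>
    intro lo hi
    simp only [segEndGo]
    split_ifs with h1 h2
    · have := ih ((lo + hi) / 2 + 1) hi; omega
    · exact ih lo ((lo + hi) / 2)
    · exact le_refl lo

theorem segEndGo_all_le (data : List Int) (target : Int) :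
    ∀ (fuel lo hi : Nat), lo ≤ hi → hi - lo ≤ fuel →
    (∀ m, lo ≤ m → m < hi → data.getD m 0 ≤ target) →
    segEndGo data target fuel lo hi = hi := by
  intro fuel
  induction fuel with
  | zero => intro lo hi h1 h2 _; simp only [segEndGo]; omega
  | succ fuel ih =>
    intro lo hi h1 h2 hall
    simp only [segEndGo]
    split_ifs with hlt hmid
    · exact ih ((lo + hi) / 2 + 1) hi (by omega) (by omega)
        (fun m hm1 hm2 => hall m (by omega) hm2)
    · exact absurd (hall ((lo + hi) / 2) (by omega) (by omega)) (by omega)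
    · omega

theorem segEndGo_le (data : List Int) (target : Int) :
    ∀ (fuel lo hi : Nat), lo ≤ hi → segEndGo data target fuel lo hi ≤ hi := by
  intro fuel
  induction fuel with
  | zero => intro lo hi h; exact h
  | succ fuel ih =>
    intro lo hi h
    simp only [segEndGo]
    split_ifs with h1 h2
    · exact ih ((lo + hi) / 2 + 1) hi (by omega)
    · have := ih lo ((lo + hi) / 2) (by omega); omega
    · exact h

theorem segEndGo_spec (data : List Int) (target : Int)
    (hs : ∀ (i j : Nat) (hi : i < data.length) (hj : j < data.length), i < j → data[i] ≤ data[j]) :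
    ∀ (fuel lo hi : Nat), hi ≤ data.length → hi - lo ≤ fuel →
    (∀ m, lo ≤ m → m < segEndGo data target fuel lo hi → data.getD m 0 ≤ target) ∧
    (segEndGo data target fuel lo hi < hi → target < data.getD (segEndGo data target fuel lo hi) 0) := by
  intro fuel
  induction fuel with
  | zero =>
    intro lo hi _ hf
    simp only [segEndGo]
    exact ⟨fun m hm1 hm2 => by omega, fun hr => by omega⟩
  | succ fuel ih =>
    intro lo hi hhi hf
    simp only [segEndGo]
    split_ifs with h1 h2
    · -- data[mid] ≤ target: recurse right
      obtain ⟨ih1, ih2⟩ := ih ((lo + hi) / 2 + 1) hi hhi (by omega)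
      refine ⟨?_, ih2⟩
      intro m hm1 hm2
      by_cases hm : (lo + hi) / 2 + 1 ≤ m
      · exact ih1 m hm hm2
      · -- m ≤ mid: data[m] ≤ data[mid] ≤ target by sortedness
        have hmidlt : (lo + hi) / 2 < data.length := by omega
        have hmlt : m < data.length := by omega
        have hmle : data[m] ≤ data[(lo + hi) / 2] := by
          rcases Nat.lt_or_ge m ((lo + hi) / 2) with h' | h'
          · exact hs m ((lo + hi) / 2) hmlt hmidlt h'
          · have : m = (lo + hi) / 2 := by omega
            subst this; exact le_refl _
        rw [List.getD_eq_getElem data 0 hmlt]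
        rw [List.getD_eq_getElem data 0 hmidlt] at h2
        exact le_trans hmle h2
    · -- target < data[mid]: recurse left
      have hmidlt : (lo + hi) / 2 < data.length := by omega
      obtain ⟨ih1, ih2⟩ := ih lo ((lo + hi) / 2) (by omega) (by omega)
      refine ⟨ih1, ?_⟩
      intro hr
      have hle' : segEndGo data target fuel lo ((lo + hi) / 2) ≤ (lo + hi) / 2 :=
        segEndGo_le data target fuel lo ((lo + hi) / 2) (by omega)
      rcases Nat.lt_or_ge (segEndGo data target fuel lo ((lo + hi) / 2)) ((lo + hi) / 2) with h' | h'
      · exact ih2 h'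
      · have heq : segEndGo data target fuel lo ((lo + hi) / 2) = (lo + hi) / 2 := by omega
        rw [heq]
        rw [List.getD_eq_getElem data 0 hmidlt]
        rw [List.getD_eq_getElem data 0 hmidlt] at h2
        omega
    · exact ⟨fun m hm1 hm2 => by omega, fun hr => by omega⟩

theorem segEnd_ge (data : List Int) (target : Int) (lo hi : Nat) :
    lo ≤ segEnd data target lo hi :=
  segEndGo_ge data target (hi - lo) lo hi

theorem segEnd_le (data : List Int) (target : Int) (lo hi : Nat) (h : lo ≤ hi) :
    segEnd data target lo hi ≤ hi :=
  segEndGo_le data target (hi - lo) lo hi h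

theorem segEnd_spec (data : List Int) (target : Int)
    (hs : ∀ (i j : Nat) (hi : i < data.length) (hj : j < data.length), i < j → data[i] ≤ data[j])
    (lo hi : Nat) (hhi : hi ≤ data.length) :
    (∀ m, lo ≤ m → m < segEnd data target lo hi → data.getD m 0 ≤ target) ∧
    (segEnd data target lo hi < hi → target < data.getD (segEnd data target lo hi) 0) :=
  segEndGo_spec data target hs (hi - lo) lo hi hhi (le_refl _)

-- skipping elements ≤ start + threshold leaves scanL's state unchanged
theorem scanL_skip (data : List Int) (threshold start : Int) :
    ∀ (k i : Nat), i + k ≤ data.length →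
    (∀ m, i ≤ m → m < i + k → data.getD m 0 ≤ start + threshold) →
    scanL (data.drop i) threshold start i = scanL (data.drop (i + k)) threshold start (i + k) := by
  intro k
  induction k with
  | zero => intro i _ _; rfl
  | succ k ih =>
    intro i hlen hsk
    have hi : i < data.length := by omega
    have hdrop : data.drop i = data[i] :: data.drop (i + 1) := List.drop_eq_getElem_cons hi
    rw [hdrop]
    have hx : data[i] ≤ start + threshold := by
      have := hsk i (le_refl i) (by omega)
      rwa [List.getD_eq_getElem data 0 hi] at this
    simp only [scanL, if_neg (not_lt.mpr hx)]
    have hrec := ih (i + 1) (by omega) (fun m hm1 hm2 => hsk m (by omega) (by omega))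
    rw [hrec]
    have harg : i + 1 + k = i + (k + 1) := by omega
    rw [harg]

theorem scanL_eq_altLoop (data : List Int) (threshold : Int)
    (hs : ∀ (i j : Nat) (hi : i < data.length) (hj : j < data.length), i < j → data[i] ≤ data[j]) :
    ∀ (fuel i : Nat), i < data.length → data.length - i ≤ fuel →
    scanL (data.drop (i + 1)) threshold (data.getD i 0) (i + 1) =
      altLoop data threshold data.length fuel i := by
  intro fuel
  induction fuel with
  | zero => intro i hi hf; omega
  | succ fuel ih =>
    intro i hi hf
    have hge : i + 1 ≤ segEnd data (data.getD i 0 + threshold) (i + 1) data.length :=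
      segEnd_ge data (data.getD i 0 + threshold) (i + 1) data.length
    have hjn : segEnd data (data.getD i 0 + threshold) (i + 1) data.length ≤ data.length :=
      segEnd_le data (data.getD i 0 + threshold) (i + 1) data.length (by omega)
    obtain ⟨hsp1, hsp2⟩ :=
      segEnd_spec data (data.getD i 0 + threshold) hs (i + 1) data.length (le_refl _)
    set j := segEnd data (data.getD i 0 + threshold) (i + 1) data.length with hjdef
    have hskip := scanL_skip data threshold (data.getD i 0) (j - (i + 1)) (i + 1)
      (by omega) (fun m hm1 hm2 => hsp1 m hm1 (by omega))
    have hij : i + 1 + (j - (i + 1)) = j := by omega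
    rw [hij] at hskip
    rw [hskip]
    simp only [altLoop, if_pos hi, ← hjdef]
    by_cases hcase : data.length ≤ j
    · have hjn' : j = data.length := by omega
      rw [if_pos hcase, hjn']
      simp [scanL, List.drop_length]
    · rw [if_neg hcase]
      have hjlt : j < data.length := by omega
      have hgt : data.getD i 0 + threshold < data.getD j 0 := hsp2 hjlt
      have hdrop : data.drop j = data[j] :: data.drop (j + 1) := List.drop_eq_getElem_cons hjlt
      rw [hdrop]
      have hgetj : data.getD j 0 = data[j] := List.getD_eq_getElem data 0 hjlt
      rw [hgetj] at hgt
      simp only [scanL, if_pos hgt]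
      congr 1
      rw [← hgetj]
      exact ih j hjlt (by omega)

-- ===== VERDICT (by name: the statement is the Claim_ definition above) =====
theorem get_splits_spec : Claim_equal_get_splits := by
  intro data threshold _ hpre
  obtain ⟨hne, hsor⟩ := hpre
  unfold Spec_get_splits
  match data with
  | [] => exact absurd rfl hne
  | d0 :: rest =>
    rcases hsor with hsort | hall
    · have hs : ∀ (i j : Nat) (hi : i < (d0 :: rest).length) (hj : j < (d0 :: rest).length),
        i < j → (d0 :: rest)[i] ≤ (d0 :: rest)[j] := by
        intro i j hi' hj' hij
        exact List.pairwise_iff_getElem.mp hsort i j hi' hj' hij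
      have hA := fold_eq_scanL threshold rest [0] d0 0
      have hB := scanL_eq_altLoop (d0 :: rest) threshold hs (d0 :: rest).length 0
        (by simp) (by omega)
      simp only [get_splits, get_splits_alt]
      rw [hA]
      rw [← hB]
      simp [List.drop]
    · -- every value ≤ data[0] + threshold: both sides return [0, length]
      have hget : ∀ m, m < (d0 :: rest).length →
          (d0 :: rest).getD m 0 ≤ d0 + threshold := by
        intro m hm
        rw [List.getD_eq_getElem _ 0 hm]
        exact hall _ (List.getElem_mem hm)
      -- A side: the scan never splits
      have hA := fold_eq_scanL threshold rest [0] d0 0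
      have hskip := scanL_skip (d0 :: rest) threshold d0 rest.length 1
        (by simp; omega) (fun m hm1 hm2 => hget m (by simp at hm2 ⊢; omega))
      have hdrop1 : (d0 :: rest).drop 1 = rest := rfl
      have hdropn : (d0 :: rest).drop (1 + rest.length) = [] := by
        apply List.drop_eq_nil_of_le; simp
      rw [hdrop1, hdropn] at hskip
      -- B side: the binary search jumps straight to the end
      have hseg : segEnd (d0 :: rest) ((d0 :: rest).getD 0 0 + threshold) 1
          (d0 :: rest).length = (d0 :: rest).length := by
        unfold segEnd
        exact segEndGo_all_le (d0 :: rest) ((d0 :: rest).getD 0 0 + threshold)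
          ((d0 :: rest).length - 1) 1 (d0 :: rest).length (by simp) (le_refl _)
          (fun m hm1 hm2 => by
            have := hget m hm2
            simpa [List.getD] using this)
      simp only [get_splits, get_splits_alt]
      rw [hA, hskip]
      have hlen : (d0 :: rest).length = rest.length + 1 := by simp
      rw [hlen]
      simp only [altLoop]
      rw [hlen] at hseg
      rw [hseg]
      simp only [if_pos (le_refl _)]
      simp [scanL]
      push_cast
      omega
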